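-- pv_equiv track=rewrite | github.com/dulumina/laravelTools-sqlmigravel | app.py | parse_sql_values
-- ===== SOURCE A (Python) =====
-- def parse_sql_values(value_str):
--     vals = []
--     current = ''
--     in_quote = False
--     escape = False
--     quote_char = ''
--     for c in value_str:
--         if escape:
--             current += c
--             escape = False
--         elif c == '\\':
--             current += c  # Keep backslash for now, can be improved
--             escape = True
--         elif in_quote:
--             current += c
--             if c == quote_char:
--                 in_quote = False
--         elif c in ("'", '"'):
--             in_quote = True
--             quote_char = c
--             current += c
--         elif c == ',' and not in_quote:
--             vals.append(clean_sql_value(current.strip()))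
--             current = ''
--         else:
--             current += c
--     if current:
--         vals.append(clean_sql_value(current.strip()))
--     return vals
--
-- def clean_sql_value(val):
--     if val.lower() == 'null':
--         return None
--     if (val.startswith("'") and val.endswith("'")) or (val.startswith('"') and val.endswith('"')):
--         return val[1:-1].replace("\\'", "'").replace('\\"', '"')
--     return val
-- ===== SOURCE B (Python) =====
-- def clean_sql_value(val):
--     if val.lower() == 'null':
--         return None
--     if (val.startswith("'") and val.endswith("'")) or (val.startswith('"') and val.endswith('"')):
--         return val[1:-1].replace("\\'", "'").replace('\\"', '"')
--     return val
--
--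
-- def parse_sql_values(value_str):
--     # Index-based scanner: quoted spans are consumed by a dedicated inner loop
--     # instead of per-character state flags.
--     vals = []
--     current = []
--     i = 0
--     n = len(value_str)
--     while i < n:
--         c = value_str[i]
--         if c == '\\':
--             # escape outside quotes: keep the backslash and take next char literally
--             current.append(c)
--             i += 1
--             if i < n:
--                 current.append(value_str[i])
--                 i += 1
--         elif c in ("'", '"'):
--             span = [c]
--             i += 1
--             while i < n:
--                 d = value_str[i]
--                 if d == '\\':
--                     span.append(d)
--                     i += 1
--                     if i < n:
--                         span.append(value_str[i])
--                         i += 1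
--                 elif d == c:
--                     span.append(d)
--                     i += 1
--                     break
--                 else:
--                     span.append(d)
--                     i += 1
--             current.extend(span)
--         elif c == ',':
--             vals.append(clean_sql_value(''.join(current).strip()))
--             current = []
--             i += 1
--         else:
--             current.append(c)
--             i += 1
--     if current:
--         vals.append(clean_sql_value(''.join(current).strip()))
--     return vals
-- ===== Notes on version B (the rewrite author's own statement) =====
-- stated objective: alternative
-- what changed: A's single for-loop with escape/in_quote/quote_char state flags is replaced by an index-based scanner in which a quoted span is consumed entirely by a dedicated inner loop, so no cross-iteration mode flags remain.
import Mathlib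
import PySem

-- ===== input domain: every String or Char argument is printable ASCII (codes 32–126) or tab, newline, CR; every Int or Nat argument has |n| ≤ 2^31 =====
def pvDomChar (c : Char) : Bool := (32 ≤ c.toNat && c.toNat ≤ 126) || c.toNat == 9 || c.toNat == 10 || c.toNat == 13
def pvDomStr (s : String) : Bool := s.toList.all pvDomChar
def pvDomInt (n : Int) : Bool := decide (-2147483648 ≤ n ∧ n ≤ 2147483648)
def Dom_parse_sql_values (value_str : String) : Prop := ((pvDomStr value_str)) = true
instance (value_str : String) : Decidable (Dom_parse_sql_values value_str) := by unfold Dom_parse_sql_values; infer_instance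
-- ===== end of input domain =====

-- B replaces A's escape/in_quote flag machine with an index scanner whose quoted
-- spans are consumed by a dedicated inner loop (objective: alternative decomposition).

-- ===== PORT A =====

-- shared module helper clean_sql_value (used verbatim by both Pythons)
def clean_sql_value (val : String) : Option String :=
  if PySem.Str.lower val = "null" then none
  else if (PySem.Str.startswith val "'" && PySem.Str.endswith val "'")
       || (PySem.Str.startswith val "\"" && PySem.Str.endswith val "\"") then
    some (PySem.Str.replace (PySem.Str.replace
            (PySem.Str.slice val (some 1) (some (-1))) "\\'" "'") "\\\"" "\"")
  else some val

-- clean_sql_value(current.strip()) applied to the accumulated characters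
def pvFlush (cur : List Char) : Option String :=
  clean_sql_value (PySem.Str.strip (String.ofList cur))

-- A's `for c in value_str` loop, state (vals, current, in_quote, escape, quote_char);
-- Python's quote_char = '' initial sentinel is ported as an arbitrary default char:
-- it is only compared while in_quote is true, which never holds with the initial value.
def loopA : List Char → List (Option String) → List Char → Bool → Bool → Char → List (Option String)
  | [], vals, current, _, _, _ =>
      if current ≠ [] then vals ++ [pvFlush current] else vals
  | c :: rest, vals, current, inq, esc, q =>
      if esc then loopA rest vals (current ++ [c]) inq false q
      else if c = '\\' then loopA rest vals (current ++ [c]) inq true q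
      else if inq then loopA rest vals (current ++ [c]) (if c = q then false else true) esc q
      else if c = '\'' ∨ c = '"' then loopA rest vals (current ++ [c]) true esc c
      else if c = ',' ∧ inq = false then loopA rest (vals ++ [pvFlush current]) [] inq esc q
      else loopA rest vals (current ++ [c]) inq esc q

def parse_sql_values (value_str : String) : List (Option String) :=
  loopA value_str.toList [] [] false false ' '

-- ===== PORT B =====

-- B's inner `while` loop: consume a span opened by quote q, returning (span so far ++ consumed, remainder)
def scanQuote (q : Char) : List Char → List Char → List Char × List Char
  | [], acc => (acc, [])
  | d :: rest, acc =>
      if d = '\\' then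
        match rest with
        | [] => (acc ++ [d], [])
        | e :: rest' => scanQuote q rest' (acc ++ [d, e])
      else if d = q then (acc ++ [d], rest)
      else scanQuote q rest (acc ++ [d])

theorem scanQuote_rest_len (q : Char) (cs acc : List Char) :
    (scanQuote q cs acc).2.length ≤ cs.length := by
  fun_induction scanQuote <;> simp_all <;> omega

-- B's top-level `while i < n` scanner
def scanTop : List Char → List (Option String) → List Char → List (Option String)
  | [], vals, current =>
      if current ≠ [] then vals ++ [pvFlush current] else vals
  | c :: rest, vals, current =>
      if c = '\\' then
        match rest with
        | [] => scanTop [] vals (current ++ [c])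
        | e :: rest' => scanTop rest' vals (current ++ [c, e])
      else if c = '\'' ∨ c = '"' then
        let p := scanQuote c rest [c]
        scanTop p.2 vals (current ++ p.1)
      else if c = ',' then
        scanTop rest (vals ++ [pvFlush current]) []
      else scanTop rest vals (current ++ [c])
  termination_by cs => cs.length
  decreasing_by
    all_goals (try have := scanQuote_rest_len c rest [c]); all_goals simp; all_goals omega

def parse_sql_values_alt (value_str : String) : List (Option String) :=
  scanTop value_str.toList [] []

-- ===== PRECONDITION & SPEC =====
def Spec_parse_sql_values (value_str : String) (out : List (Option String)) : Prop := out = parse_sql_values_alt value_str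
instance (value_str : String) (out : List (Option String)) : Decidable (Spec_parse_sql_values value_str out) := by unfold Spec_parse_sql_values; infer_instance

-- ===== CLAIM (what is proved, stated in full; the proofs are below) =====
def Claim_equal_parse_sql_values : Prop := ∀ (value_str : String), Dom_parse_sql_values value_str → Spec_parse_sql_values value_str (parse_sql_values value_str)

-- ===== LEMMAS AND PROOFS =====

-- Inside a quoted span, A's flag machine does exactly what B's inner loop does.
theorem loopA_quote (q : Char) (cs acc : List Char) (vals : List (Option String)) (current : List Char) :
    loopA cs vals (current ++ acc) true false q =
      loopA (scanQuote q cs acc).2 vals (current ++ (scanQuote q cs acc).1) false false q := by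
  fun_induction scanQuote q cs acc generalizing vals current <;> simp_all [loopA]

-- Outside quotes, A's loop equals B's scanner.
theorem loopA_eq_scanTop (cs : List Char) (vals : List (Option String)) (current : List Char) (q : Char) :
    loopA cs vals current false false q = scanTop cs vals current := by
  fun_induction scanTop cs vals current generalizing q <;> simp_all [loopA, loopA_quote]
  rename_i p ih; exact ih _

-- ===== VERDICT (by name: the statement is the Claim_ definition above) =====
theorem parse_sql_values_spec : Claim_equal_parse_sql_values := by
  intro s _
  unfold Spec_parse_sql_values parse_sql_values parse_sql_values_alt
  exact loopA_eq_scanTop _ _ _ _
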